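-- pv_equiv track=rewrite | github.com/kevinkorfmann/smckit | src/smckit/tl/_smcpp.py | _compress_onepop_observations
-- ===== SOURCE A (Python) =====
-- def _unpack_observation(
--     obs: tuple[int, ...],
--     default_n_undist: int,
-- ) -> tuple[int, int, int, int]:
--     if len(obs) == 3:
--         span, a_obs, b_obs = obs
--         return int(span), int(a_obs), int(b_obs), int(default_n_undist if b_obs >= 0 else 0)
--     if len(obs) == 4:
--         span, a_obs, b_obs, n_obs = obs
--         return int(span), int(a_obs), int(b_obs), int(n_obs)
--     raise ValueError("SMC++ observations must be (span, a, b) or (span, a, b, n)")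
--
-- def _compress_onepop_observations(
--     observations: list[tuple[int, ...]],
--     default_n_undist: int,
-- ) -> list[tuple[int, int, int, int]]:
--     rows = [_unpack_observation(obs, default_n_undist) for obs in observations]
--     if not rows:
--         return []
--     out = [list(rows[0])]
--     for row in rows[1:]:
--         if tuple(row[1:]) == tuple(out[-1][1:]):
--             out[-1][0] += row[0]
--         else:
--             out.append(list(row))
--     return [tuple(row) for row in out]
-- ===== SOURCE B (Python) =====
-- def _compress_onepop_observations(observations, default_n_undist):
--     rows = []
--     for obs in observations:
--         span, a, b, *rest = obs
--         rows.append((int(span), int(a), int(b),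
--                      int(rest[0]) if rest else int(default_n_undist if b >= 0 else 0)))
--     out = []
--     i, n = 0, len(rows)
--     while i < n:
--         key = rows[i][1:]
--         total = 0
--         j = i
--         while j < n and rows[j][1:] == key:
--             total += rows[j][0]
--             j += 1
--         out.append((total,) + key)
--         i = j
--     return out
-- ===== Notes on version B (the rewrite author's own statement) =====
-- stated objective: alternative
-- what changed: Replaces A's append-and-mutate-last accumulator loop with a group-then-reduce scan: an outer cursor finds each maximal run of rows sharing the same (a,b,n) tail and emits one tuple with the summed span, so no output element is ever revisited or mutated.
import Mathlib
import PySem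

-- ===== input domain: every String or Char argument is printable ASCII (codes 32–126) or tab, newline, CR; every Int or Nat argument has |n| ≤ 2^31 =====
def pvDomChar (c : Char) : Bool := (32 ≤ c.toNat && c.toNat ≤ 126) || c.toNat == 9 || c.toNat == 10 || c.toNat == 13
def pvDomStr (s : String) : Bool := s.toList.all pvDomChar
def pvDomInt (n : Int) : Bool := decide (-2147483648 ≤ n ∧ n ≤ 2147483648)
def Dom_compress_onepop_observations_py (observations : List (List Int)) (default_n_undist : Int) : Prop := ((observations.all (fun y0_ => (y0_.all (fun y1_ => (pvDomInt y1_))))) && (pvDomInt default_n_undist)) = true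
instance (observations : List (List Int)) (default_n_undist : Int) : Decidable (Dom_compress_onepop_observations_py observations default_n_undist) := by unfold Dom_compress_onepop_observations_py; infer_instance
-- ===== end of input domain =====

-- B replaces A's append-and-mutate-last loop by a group-then-reduce scan over maximal
-- runs of equal (a,b,n) tails; alternative decomposition, same cost, return value only.


-- ===== PORT A =====
-- _unpack_observation; the catch-all arm is Python's ValueError, excluded by Pre_.
def aUnpack (default_n_undist : Int) (obs : List Int) : Int × Int × Int × Int :=
  match obs with
  | [span, a_obs, b_obs] => (span, a_obs, b_obs, if b_obs ≥ 0 then default_n_undist else 0)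
  | [span, a_obs, b_obs, n_obs] => (span, a_obs, b_obs, n_obs)
  | _ => (0, 0, 0, 0)

-- the loop body: 'out' is kept reversed, so out[-1] is the head
def aStep (out : List (Int × Int × Int × Int)) (row : Int × Int × Int × Int) :
    List (Int × Int × Int × Int) :=
  match out with
  | [] => [row]
  | h :: t => if row.2 = h.2 then (h.1 + row.1, h.2) :: t else row :: h :: t

def compress_onepop_observations_py (observations : List (List Int)) (default_n_undist : Int) : List (Int × Int × Int × Int) :=
  let rows := observations.map (aUnpack default_n_undist)
  match rows with
  | [] => []
  | r :: rest => (rest.foldl aStep [r]).reverse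

-- ===== PORT B =====
-- B's star-unpacking: 'span, a, b, *rest = obs', n = rest[0] if rest else default
def bUnpack (default_n_undist : Int) (obs : List Int) : Int × Int × Int × Int :=
  match obs with
  | span :: a :: b :: rest =>
      (span, a, b, match rest with
                   | [] => if b ≥ 0 then default_n_undist else 0
                   | n :: _ => n)
  | _ => (0, 0, 0, 0)

-- the two-cursor grouping scan: take the maximal run with the head's tail, sum its
-- spans; fuel = remaining length bounds the outer while loop (structural recursion)
def bGroupsF : Nat → List (Int × Int × Int × Int) → List (Int × Int × Int × Int)
  | _, [] => []
  | 0, _ :: _ => []  -- unreachable: fuel ≥ length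
  | fuel + 1, r :: rest =>
    let run := rest.takeWhile (fun s => decide (s.2 = r.2))
    let rest' := rest.dropWhile (fun s => decide (s.2 = r.2))
    (r.1 + (run.map (·.1)).sum, r.2) :: bGroupsF fuel rest'

def bGroups (rows : List (Int × Int × Int × Int)) : List (Int × Int × Int × Int) :=
  bGroupsF rows.length rows

def compress_onepop_observations_py_alt (observations : List (List Int)) (default_n_undist : Int) : List (Int × Int × Int × Int) :=
  bGroups (observations.map (bUnpack default_n_undist))

-- ===== PRECONDITION & SPEC =====
-- Pre_ excludes exactly the inputs on which A's _unpack_observation raises ValueError: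
-- some observation whose length is neither 3 nor 4.
def Pre_compress_onepop_observations_py (observations : List (List Int)) (default_n_undist : Int) : Prop :=
  (observations.all (fun o => o.length == 3 || o.length == 4)) = true
instance (observations : List (List Int)) (default_n_undist : Int) : Decidable (Pre_compress_onepop_observations_py observations default_n_undist) := by unfold Pre_compress_onepop_observations_py; infer_instance

def pvWitness_compress_onepop_observations_py : List (List Int) × Int :=
  ([[2, 0, 1], [3, 0, 1, 5], [1, 1, 1, 5]], 5)

def Spec_compress_onepop_observations_py (observations : List (List Int)) (default_n_undist : Int) (out : List (Int × Int × Int × Int)) : Prop := out = compress_onepop_observations_py_alt observations default_n_undist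
instance (observations : List (List Int)) (default_n_undist : Int) (out : List (Int × Int × Int × Int)) : Decidable (Spec_compress_onepop_observations_py observations default_n_undist out) := by unfold Spec_compress_onepop_observations_py; infer_instance

-- ===== CLAIM (what is proved, stated in full; the proofs are below) =====
def Claim_equal_compress_onepop_observations_py : Prop := ∀ (observations : List (List Int)) (default_n_undist : Int), Dom_compress_onepop_observations_py observations default_n_undist → Pre_compress_onepop_observations_py observations default_n_undist → Spec_compress_onepop_observations_py observations default_n_undist (compress_onepop_observations_py observations default_n_undist)

-- ===== LEMMAS AND PROOFS =====

theorem unpack_eq (d : Int) (o : List Int) (h : o.length = 3 ∨ o.length = 4) :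
    aUnpack d o = bUnpack d o := by
  rcases o with _ | ⟨s, _ | ⟨a, _ | ⟨b, _ | ⟨n, _ | ⟨m, t⟩⟩⟩⟩⟩ <;>
    first
      | rfl
      | (exfalso; simp only [List.length_cons] at h; omega)

theorem foldl_aStep_push (rows : List (Int × Int × Int × Int))
    (h : Int × Int × Int × Int) (t : List (Int × Int × Int × Int)) :
    rows.foldl aStep (h :: t) = rows.foldl aStep [h] ++ t := by
  induction rows generalizing h t with
  | nil => simp
  | cons r rs ih =>
    simp only [List.foldl_cons, aStep]
    by_cases hc : r.2 = h.2
    · rw [if_pos hc, if_pos hc]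
      exact ih _ _
    · rw [if_neg hc, if_neg hc]
      rw [ih r (h :: t), ih r [h], List.append_assoc]
      rfl

theorem foldl_aStep_merge (run rest' : List (Int × Int × Int × Int))
    (S : Int) (k : Int × Int × Int)
    (hrun : ∀ s ∈ run, s.2 = k) :
    (run ++ rest').foldl aStep [(S, k)] =
      rest'.foldl aStep [(S + (run.map (·.1)).sum, k)] := by
  induction run generalizing S with
  | nil => simp
  | cons r rs ih =>
    have hr : r.2 = k := hrun r (by simp)
    simp only [List.cons_append, List.foldl_cons, aStep]
    rw [if_pos hr]
    rw [ih (S + r.1) (fun s hs => hrun s (by simp [hs]))]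
    have : S + r.1 + (rs.map (·.1)).sum = S + ((r :: rs).map (·.1)).sum := by
      simp [List.map_cons]; ring
    rw [this]

theorem dropWhile_head_false {α : Type} (p : α → Bool) :
    ∀ (l : List α) (x : α) (xs : List α), l.dropWhile p = x :: xs → p x = false := by
  intro l
  induction l with
  | nil => intro x xs h; simp [List.dropWhile] at h
  | cons a as ih =>
    intro x xs h
    by_cases ha : p a
    · rw [List.dropWhile_cons_of_pos ha] at h; exact ih x xs h
    · rw [List.dropWhile_cons_of_neg (by simpa using ha)] at h
      cases h; simpa using ha

theorem bGroupsF_congr : ∀ (f1 f2 : Nat) (rows : List (Int × Int × Int × Int)),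
    rows.length ≤ f1 → rows.length ≤ f2 → bGroupsF f1 rows = bGroupsF f2 rows := by
  intro f1
  induction f1 with
  | zero =>
    intro f2 rows h1 _
    have : rows = [] := List.length_eq_zero_iff.mp (Nat.le_zero.mp h1)
    subst this
    cases f2 <;> rfl
  | succ m ih =>
    intro f2 rows h1 h2
    cases rows with
    | nil => cases f2 <;> rfl
    | cons r rest =>
      cases f2 with
      | zero => simp at h2
      | succ m2 =>
        simp only [bGroupsF]
        congr 1
        exact ih m2 _
          (Nat.le_trans (List.length_dropWhile_le _ _) (by simpa using Nat.le_of_succ_le_succ h1))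
          (Nat.le_trans (List.length_dropWhile_le _ _) (by simpa using Nat.le_of_succ_le_succ h2))

theorem foldl_eq_bGroups (n : Nat) :
    ∀ (rows : List (Int × Int × Int × Int)), rows.length ≤ n →
    ∀ r : Int × Int × Int × Int, rows.foldl aStep [r] = (bGroups (r :: rows)).reverse := by
  induction n with
  | zero =>
    intro rows hlen r
    have : rows = [] := List.length_eq_zero_iff.mp (Nat.le_zero.mp hlen)
    subst this
    simp [bGroups, bGroupsF]
  | succ m ih =>
    intro rows hlen r
    unfold bGroups
    simp only [List.length_cons, bGroupsF]
    set p : (Int × Int × Int × Int) → Bool := fun s => decide (s.2 = r.2) with hp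
    have hsplit : rows = rows.takeWhile p ++ rows.dropWhile p :=
      (List.takeWhile_append_dropWhile).symm
    have hmerge := foldl_aStep_merge (rows.takeWhile p) (rows.dropWhile p) r.1 r.2
      (fun s hs => by
        have := List.mem_takeWhile_imp hs
        simpa [hp] using this)
    rw [show rows.foldl aStep [r] = (rows.takeWhile p ++ rows.dropWhile p).foldl aStep [(r.1, r.2)] by
      rw [← hsplit]]
    rw [hmerge]
    cases hd : rows.dropWhile p with
    | nil => simp [bGroupsF]
    | cons r' rs =>
      have hne : ¬ r'.2 = r.2 := by
        have := dropWhile_head_false p rows r' rs hd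
        simpa [hp] using this
      have hlen' : rs.length ≤ m := by
        have h1 : (rows.dropWhile p).length ≤ rows.length := List.length_dropWhile_le _ _
        rw [hd] at h1
        simp at h1
        omega
      simp only [List.foldl_cons, aStep, if_neg hne]
      rw [foldl_aStep_push rs r' [(r.1 + ((rows.takeWhile p).map (·.1)).sum, r.2)]]
      rw [ih rs hlen' r']
      have hle : (r' :: rs).length ≤ rows.length := by
        have := List.length_dropWhile_le p rows
        rw [hd] at this
        exact this
      rw [bGroupsF_congr rows.length (r' :: rs).length (r' :: rs) hle (Nat.le_refl _)]
      simp [bGroups]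

theorem compress_onepop_observations_py_spec : Claim_equal_compress_onepop_observations_py := by
  intro obs d _ hpre
  unfold Spec_compress_onepop_observations_py compress_onepop_observations_py compress_onepop_observations_py_alt
  unfold Pre_compress_onepop_observations_py at hpre
  simp only [List.all_eq_true, Bool.or_eq_true, beq_iff_eq] at hpre
  have hrows : obs.map (aUnpack d) = obs.map (bUnpack d) :=
    List.map_congr_left (fun o ho => unpack_eq d o (hpre o ho))
  rw [← hrows]
  cases h : obs.map (aUnpack d) with
  | nil => simp [bGroups, bGroupsF]
  | cons r rest =>
    simp only []
    rw [foldl_eq_bGroups rest.length rest (Nat.le_refl _) r, List.reverse_reverse]
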